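-- pv_equiv track=rewrite | github.com/chinmayaNK22/Variant-Proteome-DB-Generator | protein_digestor.py | Lysc
-- ===== SOURCE A (Python) =====
-- def Lysc(sequence, missed_clevage, pep_min_len, pep_max_len):
--     if 'K' in sequence:
--         get_dup_k = [i for i in range(len(sequence)) if sequence.startswith('K', i)]
--         merge_list_fltrd = get_dup_k
--         merge_list_fltrd.append(len(sequence))
--         initialize = 0
--         for iter_lst in range(len(merge_list_fltrd) - int(missed_clevage)):
--             peptide = (sequence[initialize: int(merge_list_fltrd[iter_lst + missed_clevage]) + 1])
--             if len(peptide) >= int(pep_min_len) and len(peptide) <= int(pep_max_len):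
--                 yield peptide
--             initialize = merge_list_fltrd[iter_lst] + 1
-- ===== SOURCE B (Python) =====
-- def Lysc(sequence, missed_clevage, pep_min_len, pep_max_len):
--     if 'K' in sequence:
--         # split into fragments, each ending at a 'K' (inclusive), plus the trailing piece
--         fragments = []
--         cur = []
--         for ch in sequence:
--             cur.append(ch)
--             if ch == 'K':
--                 fragments.append(''.join(cur))
--                 cur = []
--         fragments.append(''.join(cur))
--         mc = int(missed_clevage)
--         lo = int(pep_min_len)
--         hi = int(pep_max_len)
--         for i in range(len(fragments) - mc):
--             peptide = ''.join(fragments[i:i + mc + 1])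
--             if lo <= len(peptide) <= hi:
--                 yield peptide
-- ===== Notes on version B (the rewrite author's own statement) =====
-- stated objective: alternative
-- what changed: B first splits the sequence once into K-terminated fragments (plus the trailing piece) and then joins sliding windows of mc+1 fragments, instead of A's index-list of K positions with a carried start cursor and character slicing.
import Mathlib
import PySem

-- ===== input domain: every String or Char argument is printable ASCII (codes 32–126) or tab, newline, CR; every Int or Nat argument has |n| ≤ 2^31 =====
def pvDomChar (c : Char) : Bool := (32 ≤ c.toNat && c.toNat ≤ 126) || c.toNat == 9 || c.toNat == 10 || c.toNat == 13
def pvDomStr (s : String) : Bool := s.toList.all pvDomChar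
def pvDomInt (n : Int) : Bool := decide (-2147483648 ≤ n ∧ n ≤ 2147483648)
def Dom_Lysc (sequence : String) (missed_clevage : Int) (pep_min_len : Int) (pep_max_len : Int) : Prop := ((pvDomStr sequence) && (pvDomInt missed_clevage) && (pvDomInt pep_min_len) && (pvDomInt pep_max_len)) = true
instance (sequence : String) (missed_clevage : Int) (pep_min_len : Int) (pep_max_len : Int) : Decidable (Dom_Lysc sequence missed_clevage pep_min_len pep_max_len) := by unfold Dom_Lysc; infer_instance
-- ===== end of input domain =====

-- B replaces A's K-position index list + carried start cursor by a one-pass split into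
-- K-terminated fragments followed by joining sliding windows of mc+1 fragments (alternative
-- decomposition, same cost).

-- ===== PORT A =====
def Lysc (sequence : String) (missed_clevage : Int) (pep_min_len : Int) (pep_max_len : Int) : List String :=
  let s := sequence.toList
  if PySem.Chars.isIn ['K'] s then
    -- sequence.startswith('K', i): for the nonnegative i of range(len(sequence)) this equals
    -- startswith on the suffix s[i:], which drop computes exactly
    let get_dup_k : List Int :=
      (PySem.List.pyRange 0 (s.length : Int) 1).filter
        (fun i => PySem.Chars.startswith (s.drop i.toNat) ['K'])
    let merge_list_fltrd := get_dup_k ++ [(s.length : Int)]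
    -- pyGetD default 0 is never used on admitted inputs: Pre_ keeps both indices in range
    let r :=
      (PySem.List.pyRange 0 ((merge_list_fltrd.length : Int) - missed_clevage) 1).foldl
        (fun (st : Int × List String) i =>
          let peptide := PySem.List.slice s (some st.1)
            (some (PySem.List.pyGetD merge_list_fltrd (i + missed_clevage) 0 + 1))
          let out :=
            if pep_min_len ≤ (peptide.length : Int) ∧ (peptide.length : Int) ≤ pep_max_len then
              st.2 ++ [String.ofList peptide]
            else st.2
          (PySem.List.pyGetD merge_list_fltrd i 0 + 1, out))
        (0, [])
    r.2
  else []

-- ===== PORT B =====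
def Lysc_alt (sequence : String) (missed_clevage : Int) (pep_min_len : Int) (pep_max_len : Int) : List String :=
  let s := sequence.toList
  if PySem.Chars.isIn ['K'] s then
    let p := s.foldl
      (fun (st : List Char × List (List Char)) ch =>
        let cur := st.1 ++ [ch]
        if ch = 'K' then ([], st.2 ++ [cur]) else (cur, st.2))
      ([], [])
    let fragments := p.2 ++ [p.1]
    (PySem.List.pyRange 0 ((fragments.length : Int) - missed_clevage) 1).foldl
      (fun acc i =>
        let peptide := (PySem.List.slice fragments (some i) (some (i + missed_clevage + 1))).flatten
        if pep_min_len ≤ (peptide.length : Int) ∧ (peptide.length : Int) ≤ pep_max_len then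
          acc ++ [String.ofList peptide]
        else acc)
      []
  else []

-- ===== PRECONDITION & SPEC =====
-- Pre_ excludes only inputs on which A raises: with a 'K' present and a negative missed_clevage,
-- A's per-iteration update merge_list_fltrd[iter_lst] eventually indexes past the list (IndexError).
def Pre_Lysc (sequence : String) (missed_clevage : Int) (pep_min_len : Int) (pep_max_len : Int) : Prop :=
  0 ≤ missed_clevage ∨ PySem.Chars.isIn ['K'] sequence.toList = false
instance (sequence : String) (missed_clevage : Int) (pep_min_len : Int) (pep_max_len : Int) : Decidable (Pre_Lysc sequence missed_clevage pep_min_len pep_max_len) := by unfold Pre_Lysc; infer_instance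

def pvWitness_Lysc : String × Int × Int × Int := ("AKVKLM", 1, 2, 6)

def Spec_Lysc (sequence : String) (missed_clevage : Int) (pep_min_len : Int) (pep_max_len : Int) (out : List String) : Prop := out = Lysc_alt sequence missed_clevage pep_min_len pep_max_len
instance (sequence : String) (missed_clevage : Int) (pep_min_len : Int) (pep_max_len : Int) (out : List String) : Decidable (Spec_Lysc sequence missed_clevage pep_min_len pep_max_len out) := by unfold Spec_Lysc; infer_instance

-- ===== CLAIM (what is proved, stated in full; the proofs are below) =====
def Claim_equal_Lysc : Prop := ∀ (sequence : String) (missed_clevage : Int) (pep_min_len : Int) (pep_max_len : Int), Dom_Lysc sequence missed_clevage pep_min_len pep_max_len → Pre_Lysc sequence missed_clevage pep_min_len pep_max_len → Spec_Lysc sequence missed_clevage pep_min_len pep_max_len (Lysc sequence missed_clevage pep_min_len pep_max_len)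

-- ===== LEMMAS AND PROOFS =====

-- suffix-aware cons: prepend pending characters to the first fragment
def consHead (c : Char) : List (List Char) → List (List Char)
  | [] => [[c]]
  | h :: tl => (c :: h) :: tl

-- the fragments B builds: pieces ending at each 'K' (inclusive) plus the trailing piece
def fragsOf : List Char → List (List Char)
  | [] => [[]]
  | c :: t => if c = 'K' then [c] :: fragsOf t else consHead c (fragsOf t)

-- the K positions A collects
def kpos : List Char → List Nat
  | [] => []
  | c :: t => if c = 'K' then 0 :: (kpos t).map (· + 1) else (kpos t).map (· + 1)

-- cumulative length of the first j fragments
def LAux (gs : List (List Char)) (j : Nat) : Nat := ((gs.map List.length).take j).sum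

theorem fragsOf_ne_nil (cs : List Char) : fragsOf cs ≠ [] := by
  induction cs with
  | nil => simp [fragsOf]
  | cons c t ih =>
    simp only [fragsOf]
    split
    · simp
    · cases h : fragsOf t <;> simp [consHead]

theorem length_fragsOf (cs : List Char) : (fragsOf cs).length = (kpos cs).length + 1 := by
  induction cs with
  | nil => simp [fragsOf, kpos]
  | cons c t ih =>
    simp only [fragsOf, kpos]
    split
    · simpa using ih
    · cases h : fragsOf t with
      | nil => exact absurd h (fragsOf_ne_nil t)
      | cons g gs => rw [h] at ih; simpa [consHead] using ih

theorem flatten_fragsOf (cs : List Char) : (fragsOf cs).flatten = cs := by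
  induction cs with
  | nil => simp [fragsOf]
  | cons c t ih =>
    simp only [fragsOf]
    split
    · subst_vars; simpa using ih
    · cases h : fragsOf t with
      | nil => exact absurd h (fragsOf_ne_nil t)
      | cons g gs => rw [h] at ih; simpa [consHead] using ih

theorem LAux_cons (g : List Char) (gs : List (List Char)) (j : Nat) :
    LAux (g :: gs) (j + 1) = g.length + LAux gs j := by
  simp [LAux]

theorem kpos_getElem (cs : List Char) (j : Nat) (hj : j < (kpos cs).length) :
    (kpos cs)[j] + 1 = LAux (fragsOf cs) (j + 1) := by
  induction cs generalizing j with
  | nil => simp [kpos] at hj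
  | cons c t ih =>
    by_cases hc : c = 'K'
    · simp only [kpos, fragsOf, if_pos hc]
      cases j with
      | zero => simp [LAux]
      | succ j' =>
        simp only [kpos, if_pos hc] at hj
        have hj' : j' < (kpos t).length := by simpa using hj
        rw [LAux_cons]
        have h2 := ih j' hj'
        simp only [List.getElem_cons_succ, List.getElem_map, List.length_cons, List.length_nil]
        omega
    · simp only [kpos, fragsOf, if_neg hc]
      cases h : fragsOf t with
      | nil => exact absurd h (fragsOf_ne_nil t)
      | cons g gs =>
        simp only [kpos, if_neg hc] at hj
        have hj' : j < (kpos t).length := by simpa using hj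
        have h2 := ih j hj'
        rw [h, LAux_cons g] at h2
        rw [consHead, LAux_cons]
        simp only [List.getElem_map]
        simp only [List.length_cons]
        omega

theorem LAux_total (cs : List Char) : LAux (fragsOf cs) (fragsOf cs).length = cs.length := by
  unfold LAux
  rw [List.take_of_length_le (by simp)]
  have h := List.length_flatten (L := fragsOf cs)
  rw [flatten_fragsOf] at h
  omega

theorem LAux_le_len (cs : List Char) (j : Nat) : LAux (fragsOf cs) j ≤ cs.length := by
  have h := List.length_flatten (L := fragsOf cs)
  rw [flatten_fragsOf] at h
  have h2 := List.sum_take_add_sum_drop ((fragsOf cs).map List.length) j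
  unfold LAux
  omega

theorem LAux_mono (gs : List (List Char)) {j j' : Nat} (h : j ≤ j') :
    LAux gs j ≤ LAux gs j' := by
  unfold LAux
  have h1 : ((gs.map List.length).take j').take j = (gs.map List.length).take j := by
    rw [List.take_take, Nat.min_eq_left h]
  have h2 := List.sum_take_add_sum_drop ((gs.map List.length).take j') j
  rw [h1] at h2
  omega

theorem startswith_head (c : Char) (t : List Char) :
    PySem.Chars.startswith (c :: t) ['K'] = (c == 'K') := by
  simp only [PySem.Chars.startswith, List.isPrefixOf]
  by_cases h : c = 'K' <;> simp [h, eq_comm]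

theorem filter_range_eq_kpos (cs : List Char) :
    (List.range cs.length).filter (fun k => PySem.Chars.startswith (cs.drop k) ['K']) = kpos cs := by
  induction cs with
  | nil => simp [kpos]
  | cons c t ih =>
    rw [List.length_cons, List.range_succ_eq_map, List.filter_cons, List.filter_map]
    simp only [List.drop_zero, Function.comp_def, Nat.succ_eq_add_one, List.drop_succ_cons,
      startswith_head]
    by_cases hc : c = 'K'
    · simp [kpos, hc, ih]
    · simp [kpos, hc, ih]

theorem getDupK_eq (cs : List Char) :
    (PySem.List.pyRange 0 (cs.length : Int) 1).filter
        (fun i => PySem.Chars.startswith (cs.drop i.toNat) ['K'])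
      = List.map (fun k : Nat => (k : Int)) (kpos cs) := by
  rw [PySem.List.pyRange_zero_nat, List.filter_map]
  have h : ((fun i : Int => PySem.Chars.startswith (cs.drop i.toNat) ['K'])
      ∘ (fun k : Nat => (k : Int))) = fun k : Nat => PySem.Chars.startswith (cs.drop k) ['K'] := by
    funext k; simp
  rw [h, filter_range_eq_kpos]

-- prepend an accumulated piece to the first fragment
def consHeadL (cur : List Char) : List (List Char) → List (List Char)
  | [] => [cur]
  | h :: tl => (cur ++ h) :: tl

theorem foldB_general (cs : List Char) (cur : List Char) (acc : List (List Char)) :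
    (cs.foldl
        (fun (st : List Char × List (List Char)) ch =>
          let c2 := st.1 ++ [ch]
          if ch = 'K' then ([], st.2 ++ [c2]) else (c2, st.2))
        (cur, acc)).2
      ++ [(cs.foldl
        (fun (st : List Char × List (List Char)) ch =>
          let c2 := st.1 ++ [ch]
          if ch = 'K' then ([], st.2 ++ [c2]) else (c2, st.2))
        (cur, acc)).1]
    = acc ++ consHeadL cur (fragsOf cs) := by
  induction cs generalizing cur acc with
  | nil => simp [fragsOf, consHeadL]
  | cons c t ih =>
    simp only [List.foldl_cons]
    by_cases hc : c = 'K'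
    · simp only [if_pos hc, fragsOf]
      rw [ih]
      cases h : fragsOf t with
      | nil => exact absurd h (fragsOf_ne_nil t)
      | cons g gs => simp [consHeadL, hc]
    · simp only [if_neg hc, fragsOf]
      rw [ih]
      cases h : fragsOf t with
      | nil => exact absurd h (fragsOf_ne_nil t)
      | cons g gs => simp [consHeadL, consHead]

theorem frags_eq (cs : List Char) :
    (cs.foldl
        (fun (st : List Char × List (List Char)) ch =>
          let c2 := st.1 ++ [ch]
          if ch = 'K' then ([], st.2 ++ [c2]) else (c2, st.2))
        ([], [])).2
      ++ [(cs.foldl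
        (fun (st : List Char × List (List Char)) ch =>
          let c2 := st.1 ++ [ch]
          if ch = 'K' then ([], st.2 ++ [c2]) else (c2, st.2))
        ([], [])).1]
    = fragsOf cs := by
  rw [foldB_general]
  cases h : fragsOf cs with
  | nil => exact absurd h (fragsOf_ne_nil cs)
  | cons g gs => simp [consHeadL]

def startValA (ml : List Int) : Nat → Int
  | 0 => 0
  | j + 1 => PySem.List.pyGetD ml (j : Int) 0 + 1

theorem foldA_inv (ml : List Int) (cs : List Char) (mc lo hi : Int) (j : Nat) :
    (List.range j).foldl
      (fun (st : Int × List String) (k : Nat) =>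
        (PySem.List.pyGetD ml (k : Int) 0 + 1,
          if lo ≤ ((PySem.List.slice cs (some st.1)
                (some (PySem.List.pyGetD ml ((k : Int) + mc) 0 + 1))).length : Int)
              ∧ ((PySem.List.slice cs (some st.1)
                (some (PySem.List.pyGetD ml ((k : Int) + mc) 0 + 1))).length : Int) ≤ hi
          then st.2 ++ [String.ofList (PySem.List.slice cs (some st.1)
                (some (PySem.List.pyGetD ml ((k : Int) + mc) 0 + 1)))]
          else st.2))
      (0, [])
    = (startValA ml j,
        (List.range j).foldl
          (fun (acc : List String) (k : Nat) =>
            if lo ≤ ((PySem.List.slice cs (some (startValA ml k))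
                  (some (PySem.List.pyGetD ml ((k : Int) + mc) 0 + 1))).length : Int)
                ∧ ((PySem.List.slice cs (some (startValA ml k))
                  (some (PySem.List.pyGetD ml ((k : Int) + mc) 0 + 1))).length : Int) ≤ hi
            then acc ++ [String.ofList (PySem.List.slice cs (some (startValA ml k))
                  (some (PySem.List.pyGetD ml ((k : Int) + mc) 0 + 1)))]
            else acc)
          []) := by
  induction j with
  | zero => rfl
  | succ j ih =>
    rw [List.range_succ, List.foldl_append, List.foldl_append, ih]
    rfl

theorem ml_getD_lt (cs : List Char) (j : Nat) (hj : j < (kpos cs).length) :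
    (List.map (fun k : Nat => (k : Int)) (kpos cs) ++ [(cs.length : Int)]).getD j 0
      = ((kpos cs)[j] : Int) := by
  rw [List.getD_eq_getElem?_getD, List.getElem?_append_left (by simpa using hj),
    List.getElem?_map, List.getElem?_eq_getElem hj]
  rfl

theorem ml_getD_last (cs : List Char) :
    (List.map (fun k : Nat => (k : Int)) (kpos cs) ++ [(cs.length : Int)]).getD (kpos cs).length 0
      = (cs.length : Int) := by
  rw [List.getD_eq_getElem?_getD]
  rw [show (kpos cs).length = (List.map (fun k : Nat => (k : Int)) (kpos cs)).length by simp]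
  rw [List.getElem?_append_right (by simp)]
  simp

theorem startValA_eq (cs : List Char) (k : Nat) (hk : k ≤ (kpos cs).length) :
    startValA (List.map (fun k : Nat => (k : Int)) (kpos cs) ++ [(cs.length : Int)]) k
      = ((LAux (fragsOf cs) k : Nat) : Int) := by
  cases k with
  | zero => simp [startValA, LAux]
  | succ j =>
    have hj : j < (kpos cs).length := by omega
    simp only [startValA, PySem.List.pyGetD_natCast]
    rw [ml_getD_lt cs j hj]
    have := kpos_getElem cs j hj
    omega

theorem seg_flatten (cs : List Char) (a b : Nat) (hab : a ≤ b) :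
    ((fragsOf cs).drop a |>.take (b - a)).flatten
      = (cs.take (LAux (fragsOf cs) b)).drop (LAux (fragsOf cs) a) := by
  rw [List.take_drop, Nat.add_sub_cancel' hab]
  have h1 := List.drop_sum_flatten ((fragsOf cs).take b) a
  have h2 : (((fragsOf cs).take b).map List.length).take a
      = ((fragsOf cs).map List.length).take a := by
    rw [← List.map_take, List.take_take, Nat.min_eq_left hab, List.map_take]
  rw [h2] at h1
  have h3 := List.take_sum_flatten (fragsOf cs) b
  rw [flatten_fragsOf] at h3
  rw [← h1, ← h3]
  rfl

theorem pep_eq (cs : List Char) (mcN k : Nat)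
    (hk : k + mcN + 1 ≤ (fragsOf cs).length) :
    PySem.List.slice cs
        (some (startValA (List.map (fun k : Nat => (k : Int)) (kpos cs) ++ [(cs.length : Int)]) k))
        (some (PySem.List.pyGetD (List.map (fun k : Nat => (k : Int)) (kpos cs) ++ [(cs.length : Int)])
          ((k : Int) + (mcN : Int)) 0 + 1))
    = (PySem.List.slice (fragsOf cs) (some (k : Int))
        (some ((k : Int) + (mcN : Int) + 1))).flatten := by
  have hn := length_fragsOf cs
  have hm : k + mcN ≤ (kpos cs).length := by omega
  have hstart := startValA_eq cs k (by omega)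
  -- right-hand side: window of fragments
  have hrhs : (PySem.List.slice (fragsOf cs) (some (k : Int))
      (some ((k : Int) + (mcN : Int) + 1))).flatten
      = (cs.take (LAux (fragsOf cs) (k + mcN + 1))).drop (LAux (fragsOf cs) k) := by
    have hc : ((k : Int) + (mcN : Int) + 1) = ((k : Int) + ((mcN + 1 : Nat) : Int)) := by push_cast; ring
    rw [hc, PySem.List.slice_natCast_add]
    have := seg_flatten cs k (k + mcN + 1) (by omega)
    rw [show k + mcN + 1 - k = mcN + 1 by omega] at this
    exact this
  rw [hrhs, hstart]
  have hcast : ((k : Int) + (mcN : Int)) = (((k + mcN : Nat)) : Int) := by push_cast; ring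
  rw [hcast, PySem.List.pyGetD_natCast]
  rcases Nat.lt_or_ge (k + mcN) (kpos cs).length with hlt | hge
  · -- the window ends at a K position
    rw [ml_getD_lt cs _ hlt]
    have hK := kpos_getElem cs (k + mcN) hlt
    have hc2 : ((kpos cs)[k + mcN] : Int) + 1 = ((LAux (fragsOf cs) (k + mcN + 1) : Nat) : Int) := by
      omega
    rw [hc2, PySem.List.slice_natCast]
    rw [List.take_drop]
    have hmono := LAux_mono (fragsOf cs) (show k ≤ k + mcN + 1 by omega)
    rw [Nat.add_sub_cancel' hmono]
  · -- the window ends at the appended sequence length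
    have heq : k + mcN = (kpos cs).length := by omega
    rw [heq, ml_getD_last cs]
    have hc2 : ((cs.length : Int)) + 1 = (((cs.length + 1 : Nat)) : Int) := by push_cast; ring
    rw [hc2, PySem.List.slice_natCast]
    have hLk := LAux_le_len cs k
    rw [List.take_of_length_le (by simp; omega)]
    rw [show LAux (fragsOf cs) ((kpos cs).length + 1) = cs.length from by
      rw [← hn]; exact LAux_total cs]
    rw [List.take_length]

-- ===== VERDICT (by name: the statement is the Claim_ definition above) =====
theorem Lysc_spec : Claim_equal_Lysc := by
  unfold Claim_equal_Lysc
  intro seq mc lo hi _hDom hPre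
  unfold Spec_Lysc Lysc Lysc_alt
  by_cases hK : PySem.Chars.isIn ['K'] seq.toList = true
  · have hmc : 0 ≤ mc := by
      rcases hPre with h | h
      · exact h
      · rw [h] at hK; exact absurd hK (by simp)
    obtain ⟨mcN, rfl⟩ : ∃ m : Nat, mc = (m : Int) := ⟨mc.toNat, (Int.toNat_of_nonneg hmc).symm⟩
    simp only [hK, if_true, getDupK_eq, frags_eq]
    simp only [List.length_append, List.length_map, List.length_cons, List.length_nil,
      length_fragsOf]
    rw [PySem.List.pyRange_one]
    simp only [sub_zero, List.foldl_map, zero_add]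
    rw [foldA_inv]
    dsimp only
    apply PySem.List.foldl_congr_mem
    intro acc k hk
    have hkM : k < ((((kpos seq.toList).length + (0 + 1) : Nat) : Int) - (mcN : Int)).toNat :=
      List.mem_range.mp hk
    have hb : k + mcN + 1 ≤ (fragsOf seq.toList).length := by
      rw [length_fragsOf]; omega
    rw [pep_eq seq.toList mcN k hb]
  · have hK' : PySem.Chars.isIn ['K'] seq.toList = false := by
      simpa using hK
    simp [hK']
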